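-- pv_equiv track=rewrite | github.com/whyj107/CodeWar | 20221118_Spiral Column Addition.py | spiral_column2
-- ===== SOURCE A (Python) =====
-- def spiral_column2(n,c):
--     s = 0
--     while True:
--         if c == n:
--             return s + sum(range(n, 2 * n))
--         if c == 1:
--             return s + 1 + sum(range(3*n-2, 4*n-3))
--         s += 4*n*n - 9*n + 7
--         c -= 1
--         n -= 2
-- ===== SOURCE B (Python) =====
-- def spiral_column2(n, c):
--     # O(1) closed form: number of peeled rings k, then Gauss/power-sum formulas.
--     if 1 <= c and (n < c or c - 1 < n - c):
--         k = c - 1                      # loop ends at the c == 1 branch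
--         m = n - 2 * k
--         tail = 1 + ((m - 1) * (7 * m - 6)) // 2 if m >= 2 else 1
--     else:
--         k = n - c                      # loop ends at the c == n branch
--         m = n - 2 * k
--         tail = m * (3 * m - 1) // 2 if m >= 1 else 0
--     s1 = k * n - k * (k - 1)
--     s2 = k * n * n - 2 * n * k * (k - 1) + 2 * (k * (k - 1) * (2 * k - 1) // 3)
--     return 4 * s2 - 9 * s1 + 7 * k + tail
-- ===== Notes on version B (the rewrite author's own statement) =====
-- stated objective: faster
-- what changed: Replaces A's ring-peeling while-loop (one iteration per ring, plus sum(range(...)) scans) with an O(1) closed form: the ring count k is computed directly and the accumulated sum and final range sums are evaluated with Gauss/power-sum formulas.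
import Mathlib
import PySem

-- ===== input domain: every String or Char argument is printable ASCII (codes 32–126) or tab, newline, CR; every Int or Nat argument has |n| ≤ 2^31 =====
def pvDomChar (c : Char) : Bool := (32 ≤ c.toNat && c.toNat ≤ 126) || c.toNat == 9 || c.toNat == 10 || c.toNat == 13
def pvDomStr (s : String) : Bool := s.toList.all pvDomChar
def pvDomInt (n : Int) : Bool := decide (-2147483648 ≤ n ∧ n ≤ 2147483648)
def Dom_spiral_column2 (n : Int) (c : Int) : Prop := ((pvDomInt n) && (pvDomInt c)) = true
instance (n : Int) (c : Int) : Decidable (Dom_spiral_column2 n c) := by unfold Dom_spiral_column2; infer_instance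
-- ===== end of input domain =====

-- B replaces A's ring-peeling loop by an O(1) closed form (Gauss / power-sum formulas).


-- ===== PORT A =====
-- A's 'while True' loop; the fuel argument only makes it total (under Pre_ it always suffices)
def spiralLoop : Nat → Int → Int → Int → Int
  | 0, _, _, _ => 0
  | f+1, s, n, c =>
    if c = n then s + (PySem.List.pyRange n (2*n) 1).sum
    else if c = 1 then s + 1 + (PySem.List.pyRange (3*n-2) (4*n-3) 1).sum
    else spiralLoop f (s + 4*n*n - 9*n + 7) (n-2) (c-1)

def spiral_column2 (n : Int) (c : Int) : Int :=
  spiralLoop ((c-1).toNat + (n-c).toNat + 1) 0 n c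

-- ===== PORT B =====
def spiral_column2_alt (n : Int) (c : Int) : Int :=
  let kt : Int × Int :=
    if 1 ≤ c ∧ (n < c ∨ c - 1 < n - c) then
      let k := c - 1
      let m := n - 2*k
      (k, if 2 ≤ m then 1 + PySem.Int.floordiv ((m-1)*(7*m-6)) 2 else 1)
    else
      let k := n - c
      let m := n - 2*k
      (k, if 1 ≤ m then PySem.Int.floordiv (m*(3*m-1)) 2 else 0)
  let k := kt.1
  let s1 := k*n - k*(k-1)
  let s2 := k*n*n - 2*n*k*(k-1) + 2*(PySem.Int.floordiv (k*(k-1)*(2*k-1)) 3)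
  4*s2 - 9*s1 + 7*k + kt.2

-- ===== PRECONDITION & SPEC =====
-- Pre_ excludes exactly the inputs (c ≤ 0 and n < c) on which A's while-loop never terminates.
def Pre_spiral_column2 (n : Int) (c : Int) : Prop := 1 ≤ c ∨ c ≤ n
instance (n : Int) (c : Int) : Decidable (Pre_spiral_column2 n c) := by unfold Pre_spiral_column2; infer_instance
def pvWitness_spiral_column2 : Int × Int := (7, 3)

def Spec_spiral_column2 (n : Int) (c : Int) (out : Int) : Prop := out = spiral_column2_alt n c
instance (n : Int) (c : Int) (out : Int) : Decidable (Spec_spiral_column2 n c out) := by unfold Spec_spiral_column2; infer_instance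

-- ===== CLAIM (what is proved, stated in full; the proofs are below) =====
def Claim_equal_spiral_column2 : Prop := ∀ (n : Int) (c : Int), Dom_spiral_column2 n c → Pre_spiral_column2 n c → Spec_spiral_column2 n c (spiral_column2 n c)

-- ===== LEMMAS AND PROOFS =====

-- sum of range(a, a+d), doubled (Gauss)
lemma pyRange_sum_two (d : Nat) : ∀ a : Int, ((PySem.List.pyRange a (a + d) 1).sum) * 2 = d * (2*a + d - 1) := by
  induction d with
  | zero =>
    intro a
    rw [PySem.List.pyRange_one_eq_nil (by omega : a + ((0:Nat):Int) ≤ a)]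
    simp
  | succ d ih =>
    intro a
    have h1 : a ≤ a + (d:Int) := by omega
    have h2 : (a + ((d+1 : Nat) : Int)) = (a + (d:Int)) + 1 := by push_cast; ring
    rw [h2, PySem.List.pyRange_one_succ_right h1, List.sum_append]
    have h3 := ih a
    simp only [List.sum_cons, List.sum_nil]
    push_cast at h3 ⊢
    linear_combination h3

lemma floordiv_two_of_double {x y : Int} (h : x * 2 = y) : PySem.Int.floordiv y 2 = x := by
  rw [PySem.Int.floordiv_eq_ediv_of_pos (by omega)]
  omega

-- A's c == n tail equals B's closed form
lemma tail_n (n : Int) :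
    (PySem.List.pyRange n (2*n) 1).sum = (if 1 ≤ n then PySem.Int.floordiv (n*(3*n-1)) 2 else 0) := by
  by_cases h : 1 ≤ n
  · simp only [h, if_true]
    have hd : (2*n) = n + (n.toNat : Int) := by omega
    have h3 := pyRange_sum_two n.toNat n
    rw [← hd] at h3
    have hn : (n.toNat : Int) = n := by omega
    rw [hn] at h3
    exact (floordiv_two_of_double (by nlinarith [h3])).symm
  · simp only [h, if_false]
    rw [PySem.List.pyRange_one_eq_nil (by omega)]
    simp

-- A's c == 1 tail equals B's closed form
lemma tail_1 (n : Int) :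
    1 + (PySem.List.pyRange (3*n-2) (4*n-3) 1).sum
      = (if 2 ≤ n then 1 + PySem.Int.floordiv ((n-1)*(7*n-6)) 2 else 1) := by
  by_cases h : 2 ≤ n
  · simp only [h, if_true]
    have hd : (4*n-3) = (3*n-2) + ((n-1).toNat : Int) := by omega
    have h3 := pyRange_sum_two (n-1).toNat (3*n-2)
    rw [← hd] at h3
    have hn : ((n-1).toNat : Int) = n - 1 := by omega
    rw [hn] at h3
    rw [floordiv_two_of_double (x := (PySem.List.pyRange (3*n-2) (4*n-3) 1).sum) (by nlinarith [h3])]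
  · simp only [h, if_false]
    rw [PySem.List.pyRange_one_eq_nil (by omega)]
    simp

-- divisibility of the cubic term
lemma cubic_div (k : Int) : ∃ t : Int, (k-1)*(k-2)*(2*k-3) = 3*t := by
  have h : k % 3 = 0 ∨ k % 3 = 1 ∨ k % 3 = 2 := by omega
  rcases h with h | h | h
  · obtain ⟨q, hq⟩ : ∃ q, k = 3*q := ⟨k/3, by omega⟩
    exact ⟨(3*q-1)*(3*q-2)*(2*q-1), by rw [hq]; ring⟩
  · obtain ⟨q, hq⟩ : ∃ q, k = 3*q+1 := ⟨k/3, by omega⟩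
    exact ⟨q*(3*q-1)*(6*q-1), by rw [hq]; ring⟩
  · obtain ⟨q, hq⟩ : ∃ q, k = 3*q+2 := ⟨k/3, by omega⟩
    exact ⟨(3*q+1)*q*(6*q+1), by rw [hq]; ring⟩

lemma floordiv_three_of_triple {x y : Int} (h : y = 3 * x) : PySem.Int.floordiv y 3 = x := by
  rw [PySem.Int.floordiv_eq_ediv_of_pos (by omega)]
  omega

-- the two floordiv-by-3 terms of consecutive rings, explicitly
lemma fd3_pair (k : Int) : ∃ t : Int,
    PySem.Int.floordiv (k*(k-1)*(2*k-1)) 3 = t + 2*(k-1)*(k-1) ∧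
    PySem.Int.floordiv ((k-1)*((k-1)-1)*(2*(k-1)-1)) 3 = t := by
  obtain ⟨t, ht⟩ := cubic_div k
  refine ⟨t, ?_, ?_⟩
  · exact floordiv_three_of_triple (by nlinarith [ht])
  · exact floordiv_three_of_triple (by nlinarith [ht])

-- B's closed form satisfies A's ring recurrence
lemma alt_step (n c : Int) (hn : c ≠ n) (h1 : c ≠ 1) (hpre : 1 ≤ c ∨ c ≤ n) :
    spiral_column2_alt n c = 4*n*n - 9*n + 7 + spiral_column2_alt (n-2) (c-1) := by
  by_cases hb : 1 ≤ c ∧ (n < c ∨ c - 1 < n - c)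
  · have hb' : 1 ≤ c-1 ∧ (n-2 < c-1 ∨ (c-1) - 1 < (n-2) - (c-1)) := by omega
    simp only [spiral_column2_alt, if_pos hb, if_pos hb']
    obtain ⟨t, ht1, ht2⟩ := fd3_pair (c-1)
    rw [ht1, ht2]
    by_cases hm : 2 ≤ n - 2*(c-1)
    · rw [if_pos hm, if_pos (by omega : 2 ≤ (n-2) - 2*((c-1)-1))]
      ring
    · rw [if_neg hm, if_neg (by omega : ¬ 2 ≤ (n-2) - 2*((c-1)-1))]
      ring
  · have hb' : ¬ (1 ≤ c-1 ∧ (n-2 < c-1 ∨ (c-1) - 1 < (n-2) - (c-1))) := by omega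
    simp only [spiral_column2_alt, if_neg hb, if_neg hb']
    obtain ⟨t, ht1, ht2⟩ := fd3_pair (n-c)
    rw [ht1]
    rw [show (n - 2 - (c - 1)) * (n - 2 - (c - 1) - 1) * (2 * (n - 2 - (c - 1)) - 1) = (n - c - 1) * (n - c - 1 - 1) * (2 * (n - c - 1) - 1) from by ring]
    rw [ht2]
    by_cases hm : 1 ≤ n - 2*(n-c)
    · rw [if_pos hm, if_pos (by omega : 1 ≤ (n-2) - 2*((n-2) - (c-1)))]
      rw [show (n-2) - 2*((n-2) - (c-1)) = n - 2*(n-c) from by ring]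
      ring
    · rw [if_neg hm, if_neg (by omega : ¬ 1 ≤ (n-2) - 2*((n-2) - (c-1)))]
      ring

lemma fd3_zero : PySem.Int.floordiv (0*(0-1)*(2*0-1)) 3 = 0 :=
  floordiv_three_of_triple (by ring)

-- B's value when A returns through the c == n branch
lemma alt_base_n (n : Int) : spiral_column2_alt n n = (PySem.List.pyRange n (2*n) 1).sum := by
  have hb : ¬ (1 ≤ n ∧ (n < n ∨ n - 1 < n - n)) := by omega
  simp only [spiral_column2_alt, if_neg hb]
  rw [show n - n = (0:Int) from by ring, fd3_zero, tail_n n]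
  rw [show n - 2*(0:Int) = n from by ring]
  ring

-- B's value when A returns through the c == 1 branch (then n ≠ 1, else c == n fired first)
lemma alt_base_1 (n : Int) (hn : n ≠ 1) :
    spiral_column2_alt n 1 = 1 + (PySem.List.pyRange (3*n-2) (4*n-3) 1).sum := by
  have hb : 1 ≤ (1:Int) ∧ (n < 1 ∨ (1:Int) - 1 < n - 1) := by omega
  simp only [spiral_column2_alt, if_pos hb]
  rw [show (1:Int) - 1 = 0 from by ring, fd3_zero, tail_1 n]
  rw [show n - 2*(0:Int) = n from by ring]
  by_cases hm : 2 ≤ n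
  · rw [if_pos hm]; ring
  · rw [if_neg hm]; ring

-- the loop computes s + B's closed form whenever the fuel exceeds the ring count
lemma loop_eq (f : Nat) : ∀ (s n c : Int), (1 ≤ c ∨ c ≤ n) →
    (if 1 ≤ c ∧ (n < c ∨ c - 1 < n - c) then (c-1).toNat else (n-c).toNat) < f →
    spiralLoop f s n c = s + spiral_column2_alt n c := by
  induction f with
  | zero => intro s n c _ hf; omega
  | succ f ih =>
    intro s n c hpre hf
    by_cases hn : c = n
    · subst hn
      simp only [spiralLoop, if_true]
      rw [alt_base_n]
    · by_cases h1 : c = 1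
      · subst h1
        simp only [spiralLoop, if_neg hn, if_true]
        rw [alt_base_1 n (fun h => hn h.symm)]
        ring
      · simp only [spiralLoop, if_neg hn, if_neg h1]
        have hpre' : 1 ≤ c - 1 ∨ c - 1 ≤ n - 2 := by omega
        have hf' : (if 1 ≤ c-1 ∧ (n-2 < c-1 ∨ (c-1) - 1 < (n-2) - (c-1)) then (c-1-1).toNat else ((n-2)-(c-1)).toNat) < f := by
          by_cases hb : 1 ≤ c ∧ (n < c ∨ c - 1 < n - c)
          · rw [if_pos (by omega : 1 ≤ c-1 ∧ (n-2 < c-1 ∨ (c-1) - 1 < (n-2) - (c-1)))]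
            rw [if_pos hb] at hf
            omega
          · rw [if_neg (by omega : ¬ (1 ≤ c-1 ∧ (n-2 < c-1 ∨ (c-1) - 1 < (n-2) - (c-1))))]
            rw [if_neg hb] at hf
            omega
        rw [ih _ _ _ hpre' hf', alt_step n c hn h1 hpre]
        ring

-- ===== VERDICT (by name: the statement is the Claim_ definition above) =====
theorem spiral_column2_spec : Claim_equal_spiral_column2 := by
  intro n c _ hpre
  unfold Spec_spiral_column2 spiral_column2
  have hf : (if 1 ≤ c ∧ (n < c ∨ c - 1 < n - c) then (c-1).toNat else (n-c).toNat)
      < (c-1).toNat + (n-c).toNat + 1 := by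
    by_cases hb : 1 ≤ c ∧ (n < c ∨ c - 1 < n - c)
    · rw [if_pos hb]; omega
    · rw [if_neg hb]; omega
  rw [loop_eq _ 0 n c hpre hf]
  ring
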